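-- pv_equiv track=rewrite | github.com/Draxxmore/Subnetting-Questions | main.py | network_bits_id
-- ===== SOURCE A (Python) =====
-- def network_bits_id(net_class, bits, ip):
--     """Generates number of network bits and network ID based on network class.
--
--     Args:
--         net_class (string): Network class (i.e. 'A', 'B', 'C')
--         bits (string): string of 1's and 0's; representing subnet mask
--         ip (string): IPv4 Address (i.e. '127.0.0.1')
--
--     Returns:
--         subnet_bits (integer): Number of subnet bits
--         net_id_asn (string): Network ID
--     """
--     ip_split = ip.split(".")
--     network_id_list = []
--
--     if net_class == 'A':
--         subnet_bits = bits.count('1') - 8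
--         network_id_list.append(ip_split[0])
--         for num in range(3):
--             network_id_list.append("0")
--
--     if net_class == 'B':
--         subnet_bits = bits.count('1') - 16
--         for num in range(2):
--             network_id_list.append(ip_split[num])
--         for num in range(2):
--             network_id_list.append("0")
--
--     if net_class == 'C':
--         subnet_bits = bits.count('1') - 24
--         for num in range(3):
--             network_id_list.append(ip_split[num])
--         network_id_list.append("0")
--
--     net_id_ans = ".".join(network_id_list)
--
--     return subnet_bits, net_id_ans
-- ===== SOURCE B (Python) =====
-- def network_bits_id(net_class, bits, ip):
--     n = 'ABC'.index(net_class) + 1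
--     subnet_bits = -8 * n
--     for ch in bits:
--         if ch == '1':
--             subnet_bits += 1
--     head = ''
--     k = n
--     for ch in ip:
--         if ch == '.':
--             k -= 1
--             if k == 0:
--                 break
--         head += ch
--     return subnet_bits, head + '.0' * (4 - n)
-- ===== Notes on version B (the rewrite author's own statement) =====
-- stated objective: alternative
-- what changed: B never splits the IP or builds/joins an octet list: it derives the class index arithmetically from 'ABC', accumulates the subnet-bit count in one character scan of the mask, and copies the IP prefix character by character, stopping at the n-th dot, then appends the '.0' padding directly.
import Mathlib
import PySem

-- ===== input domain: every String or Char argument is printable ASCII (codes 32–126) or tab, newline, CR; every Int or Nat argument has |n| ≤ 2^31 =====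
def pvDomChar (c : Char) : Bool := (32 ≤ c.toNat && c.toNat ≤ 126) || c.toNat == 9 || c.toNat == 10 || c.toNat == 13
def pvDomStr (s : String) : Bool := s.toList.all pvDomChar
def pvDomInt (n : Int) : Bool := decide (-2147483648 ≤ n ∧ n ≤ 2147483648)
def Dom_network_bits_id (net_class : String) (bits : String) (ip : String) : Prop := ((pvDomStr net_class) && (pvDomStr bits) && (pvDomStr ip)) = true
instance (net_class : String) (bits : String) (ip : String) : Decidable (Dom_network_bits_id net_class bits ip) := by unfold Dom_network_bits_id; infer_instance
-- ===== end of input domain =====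

-- B avoids split/append-loops/join entirely: it derives the class index from 'ABC',
-- counts the subnet bits in one char scan and copies the IP prefix char by char,
-- stopping at the n-th dot (objective: alternative single-pass decomposition).

-- ===== PORT A =====
-- literal transliteration of A; the possibly-unbound subnet_bits is an Option (none = unbound);
-- ip_split[i] is pyGet? with .getD "" (Pre_ guarantees the index is in range wherever it is read)
def network_bits_id (net_class : String) (bits : String) (ip : String) : Int × String :=
  let ip_split := ((PySem.Str.split? ip ".").getD [])
  let network_id_list : List String := []
  let st : Option Int × List String :=
    if net_class == "A" then
      ((some ((PySem.Str.count bits "1" : Int) - 8)),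
       (PySem.List.pyRange 0 3 1).foldl (fun l _ => l ++ ["0"])
         (network_id_list ++ [(PySem.List.pyGet? ip_split 0).getD ""]))
    else (none, network_id_list)
  let st : Option Int × List String :=
    if net_class == "B" then
      ((some ((PySem.Str.count bits "1" : Int) - 16)),
       (PySem.List.pyRange 0 2 1).foldl (fun l _ => l ++ ["0"])
         ((PySem.List.pyRange 0 2 1).foldl
            (fun l num => l ++ [(PySem.List.pyGet? ip_split num).getD ""]) st.2))
    else st
  let st : Option Int × List String :=
    if net_class == "C" then
      ((some ((PySem.Str.count bits "1" : Int) - 24)),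
       ((PySem.List.pyRange 0 3 1).foldl
          (fun l num => l ++ [(PySem.List.pyGet? ip_split num).getD ""]) st.2) ++ ["0"])
    else st
  (st.1.getD 0, PySem.Str.join "." st.2)

-- ===== PORT B =====
-- B's prefix loop: copy chars of ip, stopping (Python break) at the k-th '.'
def bHead (k : Int) : List Char → List Char
  | [] => []
  | c :: rest =>
    if c == '.' then (if k - 1 == 0 then [] else c :: bHead (k - 1) rest)
    else c :: bHead k rest

-- literal transliteration of Source B; 'ABC'.index(net_class) raises ValueError at -1 (outside Pre_)
def network_bits_id_alt (net_class : String) (bits : String) (ip : String) : Int × String :=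
  let idx := PySem.Str.find "ABC" net_class
  if idx == -1 then (0, "")   -- ValueError in Python; excluded by Pre_
  else
    let n := idx + 1
    let subnet_bits := bits.toList.foldl (fun a ch => if ch == '1' then a + 1 else a) (-8 * n)
    let head := bHead n ip.toList
    (subnet_bits, String.ofList (head ++ List.flatten (List.replicate (4 - n).toNat ['.', '0'])))

-- ===== PRECONDITION & SPEC =====
-- Pre_ excludes exactly the inputs where A raises: unknown classes (UnboundLocalError) and
-- IPs with too few '.'-separated octets for the class (IndexError).
def Pre_network_bits_id (net_class : String) (bits : String) (ip : String) : Prop :=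
  net_class = "A"
  ∨ (net_class = "B" ∧ 2 ≤ (((PySem.Str.split? ip ".").getD [])).length)
  ∨ (net_class = "C" ∧ 3 ≤ (((PySem.Str.split? ip ".").getD [])).length)
instance (net_class : String) (bits : String) (ip : String) : Decidable (Pre_network_bits_id net_class bits ip) := by unfold Pre_network_bits_id; infer_instance

def pvWitness_network_bits_id : String × String × String := ("C", "11111111111111111111111111", "192.168.1.7")

def Spec_network_bits_id (net_class : String) (bits : String) (ip : String) (out : Int × String) : Prop := out = network_bits_id_alt net_class bits ip
instance (net_class : String) (bits : String) (ip : String) (out : Int × String) : Decidable (Spec_network_bits_id net_class bits ip out) := by unfold Spec_network_bits_id; infer_instance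

-- ===== CLAIM (what is proved, stated in full; the proofs are below) =====
def Claim_equal_network_bits_id : Prop := ∀ (net_class : String) (bits : String) (ip : String), Dom_network_bits_id net_class bits ip → Pre_network_bits_id net_class bits ip → Spec_network_bits_id net_class bits ip (network_bits_id net_class bits ip)

-- ===== LEMMAS AND PROOFS =====

-- proof-only structural model of Python's split on '.' (PySem's splitOn is fuel-based)
def mySplit : List Char → List (List Char)
  | [] => [[]]
  | c :: r => if c = '.' then [] :: mySplit r else (mySplit r).modifyHead (c :: ·)

lemma mySplit_ne_nil (cs : List Char) : mySplit cs ≠ [] := by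
  induction cs with
  | nil => simp [mySplit]
  | cons c r ih =>
    simp only [mySplit]
    split_ifs
    · simp
    · cases h : mySplit r with
      | nil => exact absurd h ih
      | cons a t => simp

lemma splitOn_go_spec (fuel : Nat) :
    ∀ (l cur : List Char) (accs : List (List Char)), l.length ≤ fuel →
      PySem.Chars.splitOn.go ['.'] fuel l cur accs =
        accs.reverse ++ (mySplit l).modifyHead (cur.reverse ++ ·) := by
  induction fuel with
  | zero =>
    intro l cur accs h
    have : l = [] := by cases l <;> simp_all
    subst this
    simp [PySem.Chars.splitOn.go, mySplit]
  | succ fuel ih =>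
    intro l cur accs h
    cases l with
    | nil => simp [PySem.Chars.splitOn.go, mySplit]
    | cons c rest =>
      simp only [PySem.Chars.splitOn.go]
      by_cases hc : c = '.'
      · subst hc
        rw [if_pos (by simp)]
        simp only [List.length_cons, List.drop_succ_cons, List.length_nil, List.drop_zero]
        rw [ih rest [] (cur.reverse :: accs) (by simpa using Nat.le_of_succ_le_succ h)]
        simp [mySplit]
        cases hm : mySplit rest with
        | nil => exact absurd hm (mySplit_ne_nil rest)
        | cons a t => simp
      · rw [if_neg (by simp [List.isPrefixOf]; intro he; exact hc he.symm)]
        rw [ih rest (c :: cur) accs (by simpa using Nat.le_of_succ_le_succ h)]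
        simp [mySplit, hc]
        cases hm : mySplit rest with
        | nil => exact absurd hm (mySplit_ne_nil rest)
        | cons a t => simp

lemma splitOn_eq_mySplit (cs : List Char) :
    PySem.Chars.splitOn cs ['.'] = mySplit cs := by
  rw [PySem.Chars.splitOn, splitOn_go_spec _ _ _ _ (by omega)]
  cases hm : mySplit cs with
  | nil => exact absurd hm (mySplit_ne_nil cs)
  | cons a t => simp

lemma count_go_ones (fuel : Nat) :
    ∀ (l : List Char) (acc : Nat), l.length ≤ fuel →
      PySem.Chars.count.go ['1'] fuel l acc = acc + l.count '1' := by
  induction fuel with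
  | zero =>
    intro l acc h
    have : l = [] := by cases l <;> simp_all
    subst this
    simp [PySem.Chars.count.go]
  | succ fuel ih =>
    intro l acc h
    cases l with
    | nil => simp [PySem.Chars.count.go]
    | cons c rest =>
      simp only [PySem.Chars.count.go]
      by_cases hc : c = '1'
      · subst hc
        rw [if_pos (by simp)]
        simp only [List.length_cons, List.drop_succ_cons, List.length_nil, List.drop_zero]
        rw [ih rest (acc + 1) (by simpa using Nat.le_of_succ_le_succ h)]
        simp
        omega
      · rw [if_neg (by simp [List.isPrefixOf]; intro he; exact hc he.symm)]
        rw [ih rest acc (by simpa using Nat.le_of_succ_le_succ h)]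
        simp [hc]

lemma count_ones (l : List Char) :
    PySem.Chars.count l ['1'] = l.count '1' := by
  rw [PySem.Chars.count, if_neg (by simp)]
  simpa using count_go_ones l.length l 0 le_rfl

lemma join_take_mySplit (cs : List Char) :
    ∀ (m : Nat), 1 ≤ m → m ≤ (mySplit cs).length →
      PySem.Chars.join ['.'] ((mySplit cs).take m) = bHead (m : Int) cs := by
  induction cs with
  | nil =>
    intro m h1 _
    cases m with
    | zero => omega
    | succ m => simp [mySplit, bHead, PySem.Chars.join, List.intercalate]
  | cons c r ih =>
    intro m h1 h2
    by_cases hc : c = '.'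
    · subst hc
      cases m with
      | zero => omega
      | succ m =>
        simp only [mySplit, if_true] at h2 ⊢
        cases m with
        | zero => simp [bHead, PySem.Chars.join, List.intercalate]
        | succ m =>
          simp only [List.take_succ_cons]
          have hlen : m + 1 ≤ (mySplit r).length := by simpa using h2
          have hne : (mySplit r).take (m+1) ≠ [] := by
            have := mySplit_ne_nil r
            cases hm : mySplit r with
            | nil => exact absurd hm this
            | cons a t => simp
          obtain ⟨a, t, ht⟩ := List.exists_cons_of_ne_nil hne
          rw [ht, PySem.Chars.join_cons_cons]
          have := ih (m+1) (by omega) hlen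
          rw [ht] at this
          rw [this]
          have hb : bHead ((m+1+1 : Nat) : Int) ('.' :: r) = '.' :: bHead ((m+1 : Nat) : Int) r := by
            simp only [bHead]
            rw [if_pos (by simp)]
            rw [if_neg (by simp; omega)]
            norm_num
          rw [hb]
          simp
    · simp only [mySplit, if_neg hc] at h2 ⊢
      cases hm : mySplit r with
      | nil => exact absurd hm (mySplit_ne_nil r)
      | cons a t =>
        rw [hm] at h2
        simp only [List.modifyHead]
        cases m with
        | zero => omega
        | succ m =>
          simp only [List.take_succ_cons]
          have hjoin : ∀ (xs : List Char) (ys : List (List Char)),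
              PySem.Chars.join ['.'] ((c :: xs) :: ys) = c :: PySem.Chars.join ['.'] (xs :: ys) := by
            intro xs ys
            cases ys with
            | nil => simp [PySem.Chars.join, List.intercalate]
            | cons b u => rw [PySem.Chars.join_cons_cons, PySem.Chars.join_cons_cons]; simp
          rw [hjoin]
          have := ih (m+1) (by omega) (by rw [hm]; simpa using h2)
          rw [hm, List.take_succ_cons] at this
          rw [this]
          have hb : bHead ((m+1 : Nat) : Int) (c :: r) = c :: bHead ((m+1 : Nat) : Int) r := by
            simp only [bHead]
            rw [if_neg (by simp [hc])]
          rw [hb]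

lemma split_getD (ip : String) :
    (PySem.Str.split? ip ".").getD [] = (mySplit ip.toList).map String.ofList := by
  rw [PySem.Str.split?]
  have : ("." : String).toList = ['.'] := by decide
  rw [this, PySem.Chars.split?, if_neg (by simp), splitOn_eq_mySplit]
  rfl

lemma pyGetD_cons1 (x y : String) (t : List String) :
    (PySem.List.pyGet? (x :: y :: t) (1 : Int)).getD "" = y := by
  simp only [PySem.List.pyGet?, PySem.List.pyIdx?]
  norm_num

lemma pyGetD_cons2 (x y z : String) (t : List String) :
    (PySem.List.pyGet? (x :: y :: z :: t) (2 : Int)).getD "" = z := by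
  simp only [PySem.List.pyGet?, PySem.List.pyIdx?]
  norm_num
  rw [if_pos (by omega)]
  simp

-- ===== VERDICT (by name: the statement is the Claim_ definition above) =====
theorem network_bits_id_spec : Claim_equal_network_bits_id := by
  intro net_class bits ip _ hpre
  unfold Spec_network_bits_id
  rcases hpre with rfl | ⟨rfl, hlen⟩ | ⟨rfl, hlen⟩
  · -- class A
    obtain ⟨a, t1, h1⟩ := List.exists_cons_of_ne_nil (mySplit_ne_nil ip.toList)
    have hjoin : PySem.Chars.join ['.'] [a] = bHead 1 ip.toList := by
      have := join_take_mySplit ip.toList 1 (by omega) (by rw [h1]; simp)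
      rw [h1, List.take_succ_cons, List.take_zero] at this
      simpa using this
    have hr3 : PySem.List.pyRange 0 3 1 = [0, 1, 2] := by decide
    have hfind : PySem.Chars.find ['A', 'B', 'C'] ['A'] = 0 := by decide
    simp [network_bits_id, network_bits_id_alt, split_getD, h1, hr3, hfind,
          List.foldl, count_ones, Prod.mk.injEq]
    refine ⟨?_, ?_⟩
    · rw [PySem.List.foldl_ite_add_one]
      simp [List.count]
      have hcp : List.countP (fun x => x == '1') bits.toList
          = List.countP (fun x => decide (x = '1')) bits.toList :=
        List.countP_congr (fun x _ => by simp)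
      omega
    · apply String.toList_inj.mp
      simp [PySem.Str.toList_join]
      rw [← hjoin]
      simp [PySem.Chars.join, List.intercalate]
  · -- class B
    rw [split_getD, List.length_map] at hlen
    obtain ⟨a, t1, h1⟩ := List.exists_cons_of_ne_nil (mySplit_ne_nil ip.toList)
    obtain ⟨b, t2, h2⟩ : ∃ b t2, t1 = b :: t2 := by
      rw [h1] at hlen; simp at hlen
      exact List.exists_cons_of_ne_nil (List.ne_nil_of_length_pos (by omega))
    have hms : mySplit ip.toList = a :: b :: t2 := by rw [h1, h2]
    have hjoin : PySem.Chars.join ['.'] [a, b] = bHead 2 ip.toList := by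
      have := join_take_mySplit ip.toList 2 (by omega) (by rw [hms]; simp)
      rw [hms, List.take_succ_cons, List.take_succ_cons, List.take_zero] at this
      simpa using this
    have hr2 : PySem.List.pyRange 0 2 1 = [0, 1] := by decide
    have hfind : PySem.Chars.find ['A', 'B', 'C'] ['B'] = 1 := by decide
    simp [network_bits_id, network_bits_id_alt, split_getD, hms, hr2, hfind,
          List.foldl, count_ones, Prod.mk.injEq]
    refine ⟨?_, ?_⟩
    · rw [PySem.List.foldl_ite_add_one]
      simp [List.count]
      have hcp : List.countP (fun x => x == '1') bits.toList
          = List.countP (fun x => decide (x = '1')) bits.toList :=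
        List.countP_congr (fun x _ => by simp)
      omega
    · apply String.toList_inj.mp
      simp [PySem.Str.toList_join]
      rw [← hjoin]
      simp [PySem.Chars.join, List.intercalate]
  · -- class C
    rw [split_getD, List.length_map] at hlen
    obtain ⟨a, t1, h1⟩ := List.exists_cons_of_ne_nil (mySplit_ne_nil ip.toList)
    obtain ⟨b, t2, h2⟩ : ∃ b t2, t1 = b :: t2 := by
      rw [h1] at hlen; simp at hlen
      exact List.exists_cons_of_ne_nil (List.ne_nil_of_length_pos (by omega))
    obtain ⟨c, t3, h3⟩ : ∃ c t3, t2 = c :: t3 := by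
      rw [h1, h2] at hlen; simp at hlen
      exact List.exists_cons_of_ne_nil (List.ne_nil_of_length_pos (by omega))
    have hms : mySplit ip.toList = a :: b :: c :: t3 := by rw [h1, h2, h3]
    have hjoin : PySem.Chars.join ['.'] [a, b, c] = bHead 3 ip.toList := by
      have := join_take_mySplit ip.toList 3 (by omega) (by rw [hms]; simp)
      rw [hms, List.take_succ_cons, List.take_succ_cons, List.take_succ_cons,
          List.take_zero] at this
      simpa using this
    have hr3 : PySem.List.pyRange 0 3 1 = [0, 1, 2] := by decide
    have hfind : PySem.Chars.find ['A', 'B', 'C'] ['C'] = 2 := by decide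
    simp [network_bits_id, network_bits_id_alt, split_getD, hms, hr3, hfind,
          List.foldl, pyGetD_cons1, pyGetD_cons2, count_ones, Prod.mk.injEq]
    refine ⟨?_, ?_⟩
    · rw [PySem.List.foldl_ite_add_one]
      simp [List.count]
      have hcp : List.countP (fun x => x == '1') bits.toList
          = List.countP (fun x => decide (x = '1')) bits.toList :=
        List.countP_congr (fun x _ => by simp)
      omega
    · apply String.toList_inj.mp
      simp [PySem.Str.toList_join]
      rw [← hjoin]
      simp [PySem.Chars.join, List.intercalate]
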